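-- pv_equiv track=rewrite | github.com/S1ngularD2ality/eidonic-language-elol | 00-100_core_glyph_architecture/glyph_98.py | collapse_chain
-- ===== SOURCE A (Python) =====
-- def collapse_chain(arr):
--     """
--     Removes values that cancel each other.
--
--     Returns:
--         List[int]
--     """
--     stack = []
--     for x in arr:
--         if stack and stack[-1] + x == 0:
--             stack.pop()
--         else:
--             stack.append(x)
--     return stack
-- ===== SOURCE B (Python) =====
-- def collapse_chain(arr):
--     """
--     Removes values that cancel each other.
--
--     Returns:
--         List[int]
--     """
--     def remove_first_pair(lst):
--         for i in range(len(lst) - 1):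
--             if lst[i] + lst[i + 1] == 0:
--                 return lst[:i] + lst[i + 2:]
--         return None
--
--     res = list(arr)
--     while True:
--         nxt = remove_first_pair(res)
--         if nxt is None:
--             return res
--         res = nxt
-- ===== Notes on version B (the rewrite author's own statement) =====
-- stated objective: alternative
-- what changed: Replaced the single-pass stack with a repeated-scan fixpoint: repeatedly find and delete the first adjacent sum-zero pair until none remains (confluence makes this equal to the stack result).
import Mathlib
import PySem

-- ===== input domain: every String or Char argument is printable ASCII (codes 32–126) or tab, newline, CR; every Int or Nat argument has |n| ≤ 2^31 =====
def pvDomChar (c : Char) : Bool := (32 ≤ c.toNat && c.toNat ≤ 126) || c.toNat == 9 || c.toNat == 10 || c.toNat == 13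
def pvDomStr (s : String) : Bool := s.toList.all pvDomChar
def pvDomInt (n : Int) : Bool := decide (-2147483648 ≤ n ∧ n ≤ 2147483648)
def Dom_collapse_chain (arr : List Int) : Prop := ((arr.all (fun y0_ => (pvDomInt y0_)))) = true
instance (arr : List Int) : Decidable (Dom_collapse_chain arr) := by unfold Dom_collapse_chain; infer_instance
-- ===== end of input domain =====

-- B replaces A's single-pass stack by a repeated-scan fixpoint (delete the first adjacent
-- sum-zero pair until none remains); same result by confluence, no speed claim.

-- ===== PORT A =====
-- one iteration of A's loop body: pop if the stack top cancels x, else append x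
def pvStep (stack : List Int) (x : Int) : List Int :=
  match stack.getLast? with
  | some t => if t + x = 0 then stack.dropLast else stack ++ [x]
  | none => stack ++ [x]

def collapse_chain (arr : List Int) : List Int :=
  arr.foldl pvStep []

-- ===== PORT B =====
-- B's remove_first_pair: delete the first adjacent sum-zero pair, none if there is no such pair
def reduceOnce : List Int → Option (List Int)
  | a :: b :: rest => if a + b = 0 then some rest else (reduceOnce (b :: rest)).map (a :: ·)
  | _ => none

-- termination measure for the fixpoint loop of B
theorem reduceOnce_length : ∀ (l l' : List Int), reduceOnce l = some l' → l'.length < l.length := by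
  intro l
  induction l with
  | nil => intro l' h; simp [reduceOnce] at h
  | cons a t ih =>
    cases t with
    | nil => intro l' h; simp [reduceOnce] at h
    | cons b rest =>
      intro l' h
      by_cases hab : a + b = 0
      · simp [reduceOnce, hab] at h
        subst h; simp
      · simp [reduceOnce, hab] at h
        obtain ⟨m, hm, hmm⟩ := h
        have := ih m hm
        subst hmm; simp at this ⊢; omega

def collapse_chain_alt (l : List Int) : List Int :=
  match h : reduceOnce l with
  | some l' => collapse_chain_alt l'
  | none => l
termination_by l.length
decreasing_by exact reduceOnce_length l l' h

-- ===== PRECONDITION & SPEC =====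
def Spec_collapse_chain (arr : List Int) (out : List Int) : Prop := out = collapse_chain_alt arr
instance (arr : List Int) (out : List Int) : Decidable (Spec_collapse_chain arr out) := by unfold Spec_collapse_chain; infer_instance

-- ===== CLAIM (what is proved, stated in full; the proofs are below) =====
def Claim_equal_collapse_chain : Prop := ∀ (arr : List Int), Dom_collapse_chain arr → Spec_collapse_chain arr (collapse_chain arr)

-- ===== LEMMAS AND PROOFS =====

-- "irreducible": no adjacent pair sums to zero
theorem chain_step (S : List Int) (x : Int)
    (h : List.IsChain (fun a b : Int => a + b ≠ 0) S) :
    List.IsChain (fun a b : Int => a + b ≠ 0) (pvStep S x) := by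
  cases hS : S.getLast? with
  | none =>
    have : S = [] := List.getLast?_eq_none_iff.mp hS
    subst this
    simp only [pvStep]
    exact List.isChain_singleton x
  | some t =>
    have hne : S ≠ [] := by rintro rfl; simp at hS
    simp only [pvStep, hS]
    split_ifs with htx
    · -- dropLast of a chain is a chain (prefix)
      have hdec : S.dropLast ++ [S.getLast hne] = S := List.dropLast_append_getLast hne
      rw [← hdec] at h
      exact (List.isChain_append.mp h).1
    · rw [List.isChain_append]
      refine ⟨h, List.isChain_singleton x, ?_⟩
      intro a ha b hb
      simp at hb; subst hb
      rw [hS] at ha; simp at ha; subst ha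
      exact htx

theorem double_step (S : List Int) (a b : Int)
    (h : List.IsChain (fun x y : Int => x + y ≠ 0) S) (hab : a + b = 0) :
    pvStep (pvStep S a) b = S := by
  cases hS : S.getLast? with
  | none =>
    have : S = [] := List.getLast?_eq_none_iff.mp hS
    subst this
    simp [pvStep]
    omega
  | some t =>
    have hne : S ≠ [] := by rintro rfl; simp at hS
    have hdec : S.dropLast ++ [S.getLast hne] = S := List.dropLast_append_getLast hne
    have hlast : S.getLast hne = t := by
      have := List.getLast?_eq_some_getLast (l := S) hne
      rw [this] at hS; exact (Option.some.inj hS)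
    by_cases hta : t + a = 0
    · -- pop, then b (= t) is pushed back
      have hbt : b = t := by omega
      have h1 : pvStep S a = S.dropLast := by simp [pvStep, hS, hta]
      rw [h1]
      cases hD : S.dropLast.getLast? with
      | none =>
        have hDnil : S.dropLast = [] := List.getLast?_eq_none_iff.mp hD
        simp [pvStep, hDnil, hbt]
        rw [← hdec, hDnil, hlast]; simp
      | some t' =>
        -- t' and t are adjacent in S, so t' + t ≠ 0
        have hDne : S.dropLast ≠ [] := by rintro h'; rw [h'] at hD; simp at hD
        have hchain : List.IsChain (fun x y : Int => x + y ≠ 0) (S.dropLast ++ [t]) := by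
          rw [hlast] at hdec; rw [hdec]; exact h
        have ht't : t' + t ≠ 0 := by
          have := (List.isChain_append.mp hchain).2.2
          exact this t' hD t (by simp)
        have : pvStep S.dropLast b = S.dropLast ++ [b] := by
          simp [pvStep, hD, hbt, ht't]
        rw [this, hbt, ← hlast, hdec]
    · have h1 : pvStep S a = S ++ [a] := by simp [pvStep, hS, hta]
      rw [h1]
      have h2 : (S ++ [a]).getLast? = some a := by simp
      simp [pvStep, h2, hab]

theorem foldl_cancel (a b : Int) (v : List Int) (hab : a + b = 0) :
    ∀ (u S : List Int), List.IsChain (fun x y : Int => x + y ≠ 0) S →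
      List.foldl pvStep S (u ++ a :: b :: v) = List.foldl pvStep S (u ++ v) := by
  intro u
  induction u with
  | nil =>
    intro S h
    simp only [List.nil_append, List.foldl_cons]
    rw [double_step S a b h hab]
  | cons x u ih =>
    intro S h
    simp only [List.cons_append, List.foldl_cons]
    exact ih _ (chain_step S x h)

theorem reduceOnce_some : ∀ (l l' : List Int), reduceOnce l = some l' →
    ∃ u a b v, a + b = 0 ∧ l = u ++ a :: b :: v ∧ l' = u ++ v := by
  intro l
  induction l with
  | nil => intro l' h; simp [reduceOnce] at h
  | cons a t ih =>
    cases t with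
    | nil => intro l' h; simp [reduceOnce] at h
    | cons b rest =>
      intro l' h
      by_cases hab : a + b = 0
      · simp [reduceOnce, hab] at h
        exact ⟨[], a, b, rest, hab, rfl, by simp [h.symm]⟩
      · simp [reduceOnce, hab] at h
        obtain ⟨m, hm, hmm⟩ := h
        obtain ⟨u, a', b', v, hab', h1, h2⟩ := ih m hm
        exact ⟨a :: u, a', b', v, hab', by simp [h1], by simp [hmm.symm, h2]⟩

theorem reduceOnce_none : ∀ (l : List Int), reduceOnce l = none →
    List.IsChain (fun a b : Int => a + b ≠ 0) l := by
  intro l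
  induction l with
  | nil => intro _; exact List.isChain_nil
  | cons a t ih =>
    cases t with
    | nil => intro _; exact List.isChain_singleton a
    | cons b rest =>
      intro h
      by_cases hab : a + b = 0
      · simp [reduceOnce, hab] at h
      · simp [reduceOnce, hab] at h
        exact List.isChain_cons_cons.mpr ⟨hab, ih h⟩

theorem foldl_irred : ∀ (l S : List Int) (t : Int), S.getLast? = some t →
    List.IsChain (fun a b : Int => a + b ≠ 0) (t :: l) →
    List.foldl pvStep S l = S ++ l := by
  intro l
  induction l with
  | nil => intro S t _ _; simp
  | cons x rest ih =>
    intro S t hS hch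
    have h1 := List.isChain_cons_cons.mp hch
    have hstep : pvStep S x = S ++ [x] := by simp [pvStep, hS, h1.1]
    simp only [List.foldl_cons, hstep]
    rw [ih (S ++ [x]) x (by simp) h1.2]
    simp

theorem foldl_nil_irred (l : List Int)
    (h : List.IsChain (fun a b : Int => a + b ≠ 0) l) :
    List.foldl pvStep [] l = l := by
  cases l with
  | nil => simp
  | cons x rest =>
    have hstep : pvStep [] x = [x] := by simp [pvStep]
    simp only [List.foldl_cons, hstep]
    exact foldl_irred rest [x] x (by simp) h

theorem key_n : ∀ (n : Nat) (l : List Int), l.length ≤ n →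
    collapse_chain l = collapse_chain_alt l := by
  intro n
  induction n with
  | zero =>
    intro l hl
    have : l = [] := List.eq_nil_of_length_eq_zero (Nat.le_zero.mp hl)
    subst this
    simp [collapse_chain, collapse_chain_alt, reduceOnce]
  | succ n ih =>
    intro l hl
    cases h : reduceOnce l with
    | none =>
      have halt : collapse_chain_alt l = l := by
        rw [collapse_chain_alt.eq_def]
        split <;> simp_all
      rw [halt]
      exact foldl_nil_irred l (reduceOnce_none l h)
    | some l' =>
      have halt : collapse_chain_alt l = collapse_chain_alt l' := by
        rw [collapse_chain_alt.eq_def]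
        split <;> simp_all
      obtain ⟨u, a, b, v, hab, h1, h2⟩ := reduceOnce_some l l' h
      have hfold : collapse_chain l = collapse_chain l' := by
        unfold collapse_chain
        rw [h1, h2]
        exact foldl_cancel a b v hab u [] List.isChain_nil
      have hlen : l'.length ≤ n := by
        have := reduceOnce_length l l' h
        omega
      rw [halt, hfold]
      exact ih l' hlen

-- ===== VERDICT (by name: the statement is the Claim_ definition above) =====
theorem collapse_chain_spec : Claim_equal_collapse_chain := by
  intro arr _
  unfold Spec_collapse_chain
  exact key_n arr.length arr (Nat.le_refl _)
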